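-- pv_equiv track=rewrite | github.com/JaehoonShin2/coding-test | Programmers/문제풀이/고득점 kit/스택-큐/Level2_기능개발.py | solution
-- ===== SOURCE A (Python) =====
-- def solution(progresses, speeds):
--
--     answer = []
--     cnt_answer = []
--
--     for idx in range(len(progresses)):
--         p = progresses[idx]
--         s = speeds[idx]
--
--         cnt = 0
--         while p < 100:
--             p += s
--             cnt += 1
--         cnt_answer.append(cnt)
--
--     start_num = cnt_answer[0]
--     result_cnt = 1
--     idx = 1
--     while idx < len(cnt_answer):
--
--         if start_num >= cnt_answer[idx]:
--             result_cnt += 1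
--             idx += 1
--
--         else:
--             answer.append(result_cnt)
--             start_num = cnt_answer[idx]
--             idx += 1
--             result_cnt = 1
--
--     answer.append(result_cnt)
--
--     return answer
-- ===== SOURCE B (Python) =====
-- def solution(progresses, speeds):
--     # remaining days per task: exact integer ceiling, no counting loop
--     days = [0 if p >= 100 else -(-(100 - p) // s) for p, s in zip(progresses, speeds)]
--     answer = []
--     lead = None
--     for d in days:
--         if lead is None or d > lead:
--             answer.append(1)
--             lead = d
--         else:
--             answer[-1] += 1
--     return answer
-- ===== Notes on version B (the rewrite author's own statement) =====
-- stated objective: simpler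
-- what changed: Each task's remaining days are computed by a closed-form integer ceiling division instead of A's per-unit while loop, and the batch grouping is a single uniform fold that increments the last batch count or opens a new batch, with no special-cased first element.
import Mathlib
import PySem

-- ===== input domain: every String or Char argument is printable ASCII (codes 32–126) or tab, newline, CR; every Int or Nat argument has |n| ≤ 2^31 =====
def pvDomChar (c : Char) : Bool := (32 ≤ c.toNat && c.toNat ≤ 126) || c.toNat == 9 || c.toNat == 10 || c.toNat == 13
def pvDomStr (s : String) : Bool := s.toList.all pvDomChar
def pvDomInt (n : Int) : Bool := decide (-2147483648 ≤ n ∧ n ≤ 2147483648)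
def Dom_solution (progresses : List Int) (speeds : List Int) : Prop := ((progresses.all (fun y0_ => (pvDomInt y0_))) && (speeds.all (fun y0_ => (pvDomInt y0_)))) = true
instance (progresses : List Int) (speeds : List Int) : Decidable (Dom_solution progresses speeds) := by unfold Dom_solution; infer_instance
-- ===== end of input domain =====

-- B replaces A's per-unit "while p < 100" counting loop by a closed-form integer
-- ceiling division and groups batches in one uniform fold (objective: simpler).

-- ===== PORT A =====
-- the inner "while p < 100: p += s; cnt += 1" loop; fuel (100-p).toNat only makes
-- it total — with 1 ≤ s it is exactly Python's loop (with s ≤ 0 Python diverges,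
-- which Pre_ excludes)
def countLoop : Nat → Int → Int → Int → Int
  | 0, _, _, cnt => cnt
  | f + 1, p, s, cnt => if p < 100 then countLoop f (p + s) s (cnt + 1) else cnt

-- the "while idx < len(cnt_answer)" loop over the remaining days list
def groupLoop : List Int → Int → Int → List Int → List Int
  | [], _, result_cnt, answer => answer ++ [result_cnt]
  | d :: rest, start_num, result_cnt, answer =>
      if start_num ≥ d then groupLoop rest start_num (result_cnt + 1) answer
      else groupLoop rest d 1 (answer ++ [result_cnt])

def solution (progresses : List Int) (speeds : List Int) : List Int :=
  let cnt_answer := (List.range progresses.length).map (fun idx =>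
    let p := progresses.getD idx 0
    let s := speeds.getD idx 0   -- Python raises IndexError if speeds is shorter; Pre_ excludes that
    countLoop (100 - p).toNat p s 0)
  match cnt_answer with
  | [] => []          -- Python raises IndexError at cnt_answer[0]; Pre_ excludes []
  | c :: rest => groupLoop rest c 1 []

-- ===== PORT B =====
-- days = 0 if p >= 100 else -(-(100 - p) // s)
def daysB (p : Int) (s : Int) : Int :=
  if p ≥ 100 then 0 else -(PySem.Int.floordiv (-(100 - p)) s)

-- B's single fold over days; answer is kept reversed so that Python's
-- "answer.append(1)" / "answer[-1] += 1" are cons / modify-head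
def bGo : List Int → Option Int → List Int → List Int
  | [], _, acc => acc.reverse
  | d :: rest, lead, acc =>
      match lead with
      | none => bGo rest (some d) (1 :: acc)
      | some l =>
          if l < d then bGo rest (some d) (1 :: acc)
          else match acc with
               | c :: t => bGo rest (some l) ((c + 1) :: t)
               | [] => []   -- unreachable: acc is nonempty whenever lead is set

def solution_alt (progresses : List Int) (speeds : List Int) : List Int :=
  bGo ((progresses.zip speeds).map (fun q => daysB q.1 q.2)) none []

-- ===== PRECONDITION & SPEC =====
-- Pre_ excludes exactly where Python A does not return: empty progresses
-- (IndexError at cnt_answer[0]), speeds shorter than progresses (IndexError),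
-- and any unfinished task with speed ≤ 0 (the while loop diverges).
def Pre_solution (progresses : List Int) (speeds : List Int) : Prop :=
  progresses ≠ [] ∧ progresses.length ≤ speeds.length ∧
    ∀ q ∈ progresses.zip speeds, 100 ≤ q.1 ∨ 1 ≤ q.2
instance (progresses : List Int) (speeds : List Int) : Decidable (Pre_solution progresses speeds) := by
  unfold Pre_solution; infer_instance

def pvWitness_solution : List Int × List Int := ([93, 30, 55], [1, 30, 5])

def Spec_solution (progresses : List Int) (speeds : List Int) (out : List Int) : Prop := out = solution_alt progresses speeds
instance (progresses : List Int) (speeds : List Int) (out : List Int) : Decidable (Spec_solution progresses speeds out) := by unfold Spec_solution; infer_instance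

-- ===== CLAIM (what is proved, stated in full; the proofs are below) =====
def Claim_equal_solution : Prop := ∀ (progresses : List Int) (speeds : List Int), Dom_solution progresses speeds → Pre_solution progresses speeds → Spec_solution progresses speeds (solution progresses speeds)

-- ===== LEMMAS AND PROOFS =====

-- one step of the ceiling: ⌈(100-p)/s⌉ = 1 + (remaining after one step)
theorem ceil_step (p s : Int) (hs : 1 ≤ s) (hp : p < 100) :
    -(PySem.Int.floordiv (-(100 - p)) s)
      = 1 + (if p + s < 100 then -(PySem.Int.floordiv (-(100 - (p + s))) s) else 0) := by
  by_cases h : p + s < 100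
  · simp only [h, if_pos]
    have hq : -(PySem.Int.floordiv (-(100 - (p + s))) s) = -(PySem.Int.floordiv (-(100 - (p + s))) s) := rfl
    obtain ⟨h1, h2⟩ := (PySem.Int.neg_floordiv_neg_eq_iff_of_pos (by omega)).mp hq
    rw [PySem.Int.neg_floordiv_neg_eq_iff_of_pos (by omega)]
    constructor <;> nlinarith
  · simp only [h, if_neg, not_false_iff, add_zero]
    rw [PySem.Int.neg_floordiv_neg_eq_iff_of_pos (by omega)]
    constructor <;> nlinarith

theorem countLoop_eq (f : Nat) : ∀ (p cnt s : Int), 1 ≤ s → (100 - p).toNat ≤ f →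
    countLoop f p s cnt = cnt + (if p < 100 then -(PySem.Int.floordiv (-(100 - p)) s) else 0) := by
  induction f with
  | zero =>
      intro p cnt s hs hf
      have : ¬ p < 100 := by omega
      simp [countLoop, this]
  | succ f ih =>
      intro p cnt s hs hf
      by_cases hp : p < 100
      · have hf' : (100 - (p + s)).toNat ≤ f := by omega
        simp only [countLoop, hp, if_pos]
        rw [ih (p + s) (cnt + 1) s hs hf', ceil_step p s hs hp]
        by_cases h2 : p + s < 100
        · simp only [h2, if_pos]; ring
        · simp only [h2, if_neg, not_false_iff]; ring
      · simp [countLoop, hp]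

-- the per-task day counts agree under Pre_'s per-pair condition
theorem days_eq (p s : Int) (h : 100 ≤ p ∨ 1 ≤ s) :
    countLoop (100 - p).toNat p s 0 = daysB p s := by
  by_cases hp : 100 ≤ p
  · have : (100 - p).toNat = 0 := by omega
    simp [this, countLoop, daysB, hp]
  · have hs : 1 ≤ s := by omega
    rw [countLoop_eq _ p 0 s hs le_rfl]
    simp [daysB, hp, show p < 100 by omega]

-- the two days lists coincide
theorem daysList_eq (ps ss : List Int) (hlen : ps.length ≤ ss.length)
    (hall : ∀ q ∈ ps.zip ss, 100 ≤ q.1 ∨ 1 ≤ q.2) :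
    (List.range ps.length).map (fun idx =>
        countLoop (100 - ps.getD idx 0).toNat (ps.getD idx 0) (ss.getD idx 0) 0)
      = (ps.zip ss).map (fun q => daysB q.1 q.2) := by
  apply List.ext_getElem
  · simp [List.length_zip]; omega
  · intro i h1 h2
    have hips : i < ps.length := by simpa using h1
    have hiss : i < ss.length := by omega
    have hz : i < (ps.zip ss).length := by simpa [List.length_zip] using h2
    have hmem : (ps.zip ss)[i] ∈ ps.zip ss := List.getElem_mem hz
    have := days_eq ps[i] ss[i] (by simpa [List.getElem_zip] using hall _ hmem)
    simpa [List.getElem_zip, List.getD_eq_getElem, hips, hiss] using this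

-- A's tail loop pulls the accumulated answer out front
theorem groupLoop_append (l : List Int) : ∀ (s c : Int) (ans : List Int),
    groupLoop l s c ans = ans ++ groupLoop l s c [] := by
  induction l with
  | nil => intro s c ans; simp [groupLoop]
  | cons d rest ih =>
      intro s c ans
      by_cases h : s ≥ d
      · simp only [groupLoop, h, if_pos]; exact ih s (c + 1) ans
      · simp only [groupLoop, h, if_neg, not_false_iff, List.nil_append]
        rw [ih d 1 (ans ++ [c]), ih d 1 [c], List.append_assoc]

-- B's fold with a live lead computes A's tail loop (acc reversed in front)
theorem bGo_eq (l : List Int) : ∀ (start cnt : Int) (acc : List Int),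
    bGo l (some start) (cnt :: acc) = acc.reverse ++ groupLoop l start cnt [] := by
  induction l with
  | nil => intro start cnt acc; simp [bGo, groupLoop]
  | cons d rest ih =>
      intro start cnt acc
      by_cases h : start < d
      · have h' : ¬ start ≥ d := by omega
        simp only [bGo, groupLoop, if_pos h, if_neg h', List.nil_append]
        rw [ih d 1 (cnt :: acc), groupLoop_append rest d 1 [cnt]]
        simp
      · have h' : start ≥ d := by omega
        simp only [bGo, groupLoop, if_neg h, if_pos h']
        exact ih start (cnt + 1) acc

-- ===== VERDICT (by name: the statement is the Claim_ definition above) =====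
theorem solution_spec : Claim_equal_solution := by
  intro ps ss _ hpre
  obtain ⟨hne, hlen, hall⟩ := hpre
  unfold Spec_solution solution solution_alt
  simp only
  rw [daysList_eq ps ss hlen hall]
  have hz : (ps.zip ss).map (fun q => daysB q.1 q.2) ≠ [] := by
    cases ps with
    | nil => exact absurd rfl hne
    | cons p pt =>
        cases ss with
        | nil => simp at hlen
        | cons s st => simp
  cases hd : (ps.zip ss).map (fun q => daysB q.1 q.2) with
  | nil => exact absurd hd hz
  | cons c rest =>
      simp only [bGo]
      rw [bGo_eq rest c 1 []]
      simp
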